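-- pv_equiv track=rewrite | github.com/Kang-bh/Algorithm | 11. 그리디 문제/11-6.py | solution
-- ===== SOURCE A (Python) =====
-- def check(food_times, answer):
--     while food_times[answer] == 0:  # food_time 이 0이 아닐 때 까지.
--         answer += 1
--         if answer == len(food_times):
--             answer = 0
--     return answer
--
-- def solution(food_times, k):
--     answer = 0
--     for _ in range(k):
--         # food_time이 0일 때
--         food_times[answer] -= 1
--         answer += 1
--         if answer == len(food_times):
--             answer = 0
--         answer = check(food_times, answer)
--     return answer
-- ===== SOURCE B (Python) =====
-- def solution(food_times, k):
--     # Round-robin rotation: a FIFO queue (a list with a moving head) seeded with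
--     # every dish in order.  Each second the dish at the front is eaten for one
--     # second and rotated to the back; dishes found empty at the front are
--     # discarded from the rotation for good.
--     queue = list(enumerate(food_times))
--     head = 0
--     while k > 0:
--         i, t = queue[head]
--         head += 1
--         t -= 1
--         if t:
--             queue.append((i, t))
--         while queue[head][1] == 0:
--             head += 1
--         k -= 1
--     return queue[head][0]
-- ===== Notes on version B (the rewrite author's own statement) =====
-- stated objective: alternative
-- what changed: Replaces the per-second pointer walk over the mutated array (whose inner `check` loop rescans past emptied dishes every second) by a FIFO rotation queue of (index, remaining) pairs seeded with every dish in order: each second the front dish is eaten for one second and rotated to the back, and dishes found empty at the front are discarded from the rotation for good, so they are never rescanned; B does not mutate its argument. …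
-- outside the precondition, e.g. on solution([], 0): A returns 0, B raises IndexError; on solution([], -1): A returns 0, B raises IndexError
import Mathlib
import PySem

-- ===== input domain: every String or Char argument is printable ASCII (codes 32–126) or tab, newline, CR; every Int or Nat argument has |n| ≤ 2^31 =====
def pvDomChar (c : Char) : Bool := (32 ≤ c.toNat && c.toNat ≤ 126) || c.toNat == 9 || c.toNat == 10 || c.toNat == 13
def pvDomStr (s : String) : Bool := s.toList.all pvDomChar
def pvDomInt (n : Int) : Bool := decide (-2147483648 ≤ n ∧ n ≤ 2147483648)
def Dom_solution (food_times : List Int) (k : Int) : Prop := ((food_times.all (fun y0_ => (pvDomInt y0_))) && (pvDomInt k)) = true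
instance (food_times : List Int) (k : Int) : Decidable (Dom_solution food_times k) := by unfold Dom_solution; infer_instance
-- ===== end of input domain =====

-- B replaces A's per-second pointer walk over the mutated array (whose inner `check`
-- loop rescans emptied dishes every second) by a FIFO rotation queue from which
-- dishes found empty at the front are discarded for good; equivalence is about the
-- RETURN value only (Python A mutates food_times in place, B does not).

-- ===== PORT A =====
-- `check`'s while-loop, fuel-bounded (length + 1 steps always suffice when some entry
-- is nonzero, which is the case whenever A's loop runs under Pre_); `pyGetD` is exact
-- while the index is in range, always the case under Pre_ (outside it Python raises
-- IndexError).
def checkGo (ft : List Int) : Nat → Int → Int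
  | 0, answer => answer
  | fuel + 1, answer =>
    if PySem.List.pyGetD ft answer 0 = 0 then
      checkGo ft fuel (if answer + 1 = (ft.length : Int) then 0 else answer + 1)
    else answer

def checkA (ft : List Int) (answer : Int) : Int := checkGo ft (ft.length + 1) answer

-- the `for _ in range(k)` loop; the mutated food_times list is threaded as state
def solGo : Nat → List Int → Int → Int
  | 0, _, answer => answer
  | n + 1, ft, answer =>
    let ft' := PySem.List.pySetD ft answer (PySem.List.pyGetD ft answer 0 - 1)
    solGo n ft' (checkA ft' (if answer + 1 = (ft'.length : Int) then 0 else answer + 1))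

def solution (food_times : List Int) (k : Int) : Int := solGo k.toNat food_times 0

-- ===== PORT B =====
-- the inner `while queue[head][1] == 0` loop that discards empty dishes at the front
-- (Python raises IndexError when the queue runs out there, outside Pre_)
def clean : List (Int × Int) → List (Int × Int)
  | [] => []
  | (i, t) :: rest => if t = 0 then clean rest else (i, t) :: rest

-- the `while k > 0` loop over the queue (list + moving head = pop front / push back);
-- popping an empty queue raises IndexError in Python (outside Pre_)
def bGo : Nat → List (Int × Int) → List (Int × Int)
  | 0, q => q
  | _ + 1, [] => []
  | n + 1, (i, t) :: rest => bGo n (clean (if t - 1 ≠ 0 then rest ++ [(i, t - 1)] else rest))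

def solution_alt (food_times : List Int) (k : Int) : Int :=
  ((bGo k.toNat (PySem.List.enumerate food_times 0)).headD (0, 0)).1

-- ===== PRECONDITION & SPEC =====
-- sum of the positive food amounts = total number of seconds of food available
def SP (food_times : List Int) : Int := (food_times.map (fun x => max x 0)).sum

-- Pre_ excludes exactly the inputs on which one of the programs produces no value:
-- the empty list (A raises IndexError for k ≥ 1 and returns 0 only because its loop
-- body never runs for k ≤ 0, while B raises IndexError on queue[head]), and the
-- inputs on which A's `check` loop never terminates (k ≥ 1, no negative amount,
-- nonzero first dish, and k ≥ SP so all the food runs out), where B raises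
-- IndexError on its exhausted queue.
def Pre_solution (food_times : List Int) (k : Int) : Prop :=
  food_times ≠ [] ∧
    ¬(1 ≤ k ∧ (∀ x ∈ food_times, 0 ≤ x) ∧ food_times.getD 0 0 ≠ 0 ∧ SP food_times ≤ k)

instance (food_times : List Int) (k : Int) : Decidable (Pre_solution food_times k) := by
  unfold Pre_solution; infer_instance

def pvWitness_solution : List Int × Int := ([3, 1, 2], 4)

def Spec_solution (food_times : List Int) (k : Int) (out : Int) : Prop := out = solution_alt food_times k
instance (food_times : List Int) (k : Int) (out : Int) : Decidable (Spec_solution food_times k out) := by unfold Spec_solution; infer_instance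

-- ===== CLAIM (what is proved, stated in full; the proofs are below) =====
def Claim_equal_solution : Prop := ∀ (food_times : List Int) (k : Int), Dom_solution food_times k → Pre_solution food_times k → Spec_solution food_times k (solution food_times k)

-- ===== LEMMAS AND PROOFS =====

-- the list seen from position a onwards, cyclically
def cyc {α : Type} (l : List α) (a : Nat) : List α := l.drop a ++ l.take a

-- B's queue, expressed over A's state: the (index, amount) pairs in cyclic index
-- order starting at position a, minus the zero-amount dishes already discarded (Z)
def Qz (ft : List Int) (a : Nat) (Z : List Int) : List (Int × Int) :=
  (cyc (PySem.List.enumerate ft 0) a).filter (fun p => decide (¬ p.1 ∈ Z))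

-- only zero-amount dishes are ever discarded
def ZOK (ft : List Int) (Z : List Int) : Prop :=
  ∀ p ∈ PySem.List.enumerate ft 0, p.1 ∈ Z → p.2 = 0

-- the nonzero entries in cyclic order, and the distance to the first one: the
-- termination measure for A's `check` loop
def Qe (ft : List Int) (a : Nat) : List (Int × Int) :=
  (cyc (PySem.List.enumerate ft 0) a).filter (fun p => decide (p.2 ≠ 0))

def Zc (ft : List Int) (a : Nat) : Nat :=
  (cyc (PySem.List.enumerate ft 0) a).findIdx (fun p => decide (p.2 ≠ 0))

theorem cyc_head {α : Type} (l : List α) (a : Nat) (h : a < l.length) :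
    cyc l a = l[a] :: (l.drop (a + 1) ++ l.take a) := by
  unfold cyc
  rw [← List.getElem_cons_drop h, List.cons_append]

theorem cyc_succ {α : Type} (l : List α) (a : Nat) (h : a < l.length) :
    cyc l (a + 1) = (l.drop (a + 1) ++ l.take a) ++ [l[a]] := by
  unfold cyc
  rw [List.take_add_one, List.getElem?_eq_getElem h]
  rw [Option.toList_some, List.append_assoc]

theorem cyc_zero {α : Type} (l : List α) : cyc l 0 = l := by simp [cyc]

theorem cyc_len {α : Type} (l : List α) : cyc l l.length = l := by simp [cyc]

theorem cyc_of_eq_length {α : Type} (l : List α) (a : Nat) (h : a = l.length) : cyc l a = l := by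
  subst h; exact cyc_len l

theorem enum_head (ft : List Int) (a : Nat) (h : a < ft.length) :
    cyc (PySem.List.enumerate ft 0) a
      = ((a : Int), ft[a]) :: ((PySem.List.enumerate ft 0).drop (a + 1) ++ (PySem.List.enumerate ft 0).take a) := by
  rw [cyc_head _ a (by simp [PySem.List.length_enumerate, h])]
  congr 1
  simp [PySem.List.getElem_enumerate]

theorem enum_rot (ft : List Int) (a : Nat) (h : a < ft.length) :
    cyc (PySem.List.enumerate ft 0) (a + 1)
      = ((PySem.List.enumerate ft 0).drop (a + 1) ++ (PySem.List.enumerate ft 0).take a) ++ [((a : Int), ft[a])] := by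
  rw [cyc_succ _ a (by simp [PySem.List.length_enumerate, h])]
  congr 2
  simp [PySem.List.getElem_enumerate]

-- every pair in the enumeration away from position a has first component ≠ a
theorem fst_ne_of_mem_rest (ft : List Int) (a : Nat) (p : Int × Int)
    (hp : p ∈ (PySem.List.enumerate ft 0).drop (a + 1) ++ (PySem.List.enumerate ft 0).take a) :
    p.1 ≠ (a : Int) := by
  rcases List.mem_append.mp hp with h | h
  · rcases List.mem_iff_getElem.mp h with ⟨i, hi, hpi⟩
    rw [List.getElem_drop] at hpi
    have hlt : a + 1 + i < ft.length := by
      have := hi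
      simp [PySem.List.length_enumerate] at this
      omega
    rw [PySem.List.getElem_enumerate (h := by simp [PySem.List.length_enumerate, hlt])] at hpi
    rw [← hpi]
    simp
    omega
  · rcases List.mem_iff_getElem.mp h with ⟨i, hi, hpi⟩
    have hia : i < a := by
      have := hi
      simp at this
      omega
    rw [List.getElem_take] at hpi
    have hlt : i < ft.length := by
      have := hi
      simp [PySem.List.length_enumerate] at this
      omega
    rw [PySem.List.getElem_enumerate (h := by simp [PySem.List.length_enumerate, hlt])] at hpi
    rw [← hpi]
    simp
    omega

-- ZOK gives: a discarded position holds a zero amount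
theorem ZOK_get (ft : List Int) (Z : List Int) (hZ : ZOK ft Z) (j : Nat) (hj : j < ft.length)
    (hm : (j : Int) ∈ Z) : ft[j] = 0 := by
  exact hZ ((j : Int), ft[j]) ((PySem.List.mem_enumerate_iff ft 0 _).mpr ⟨j, hj, by simp⟩) hm

-- discarding the (zero-amount) front dish b: the queue seen from the next position
theorem Qz_rot (ft : List Int) (b : Nat) (hb : b < ft.length) (Z : List Int)
    (hbZ : (b : Int) ∈ Z) (b' : Nat) (hb' : b' = if b + 1 = ft.length then 0 else b + 1) :
    Qz ft b' Z = Qz ft b Z := by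
  have hhd := enum_head ft b hb
  have hrot := enum_rot ft b hb
  have hL : Qz ft b Z = ((PySem.List.enumerate ft 0).drop (b + 1) ++ (PySem.List.enumerate ft 0).take b).filter
      (fun p => decide (¬ p.1 ∈ Z)) := by
    rw [Qz, hhd]; simp [hbZ]
  by_cases hw : b + 1 = ft.length
  · have hlen2 : b + 1 = (PySem.List.enumerate ft 0).length := by
      rw [PySem.List.length_enumerate]; omega
    rw [cyc_of_eq_length (PySem.List.enumerate ft 0) (b + 1) hlen2] at hrot
    rw [hb', if_pos hw, Qz, cyc_zero, hrot, List.filter_append, hL]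
    simp [hbZ]
  · rw [hb', if_neg hw, Qz, hrot, List.filter_append, hL]
    simp [hbZ]

-- ===== the `check` loop against the front-cleanup loop =====
theorem check_clean (fuel : Nat) (ft : List Int) : ∀ (b : Nat) (Z : List Int),
    b < ft.length → ZOK ft Z →
    Qe ft b ≠ [] → Zc ft b < fuel →
    ∃ c : Nat, ∃ W : List Int, c < ft.length ∧ checkGo ft fuel (b : Int) = (c : Int) ∧
      ft.getD c 0 ≠ 0 ∧ ZOK ft W ∧ ¬((c : Int) ∈ W) ∧
      clean (Qz ft b Z) = Qz ft c W := by
  induction fuel with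
  | zero => intro b Z _ _ _ hf; omega
  | succ fuel ih =>
    intro b Z hb hZok hne hf
    have hpg : PySem.List.pyGetD ft (b : Int) 0 = ft[b] := by
      rw [PySem.List.pyGetD_natCast]; exact List.getD_eq_getElem ft 0 hb
    by_cases hz : ft[b] = 0
    · -- skip this zero entry
      have hhd := enum_head ft b hb
      have hrot := enum_rot ft b hb
      have hQ : Qe ft b = ((PySem.List.enumerate ft 0).drop (b + 1) ++ (PySem.List.enumerate ft 0).take b).filter
          (fun p => decide (p.2 ≠ 0)) := by
        rw [Qe, hhd]; simp [hz]
      have hex : ∃ p ∈ ((PySem.List.enumerate ft 0).drop (b + 1) ++ (PySem.List.enumerate ft 0).take b),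
          (fun p : Int × Int => decide (p.2 ≠ 0)) p = true := by
        rcases List.exists_mem_of_ne_nil _ (hQ ▸ hne) with ⟨p, hp⟩
        exact ⟨p, (List.mem_filter.mp hp).1, (List.mem_filter.mp hp).2⟩
      have hltl : ((PySem.List.enumerate ft 0).drop (b + 1) ++ (PySem.List.enumerate ft 0).take b).findIdx
          (fun p => decide (p.2 ≠ 0)) < ((PySem.List.enumerate ft 0).drop (b + 1) ++ (PySem.List.enumerate ft 0).take b).length :=
        List.findIdx_lt_length_of_exists hex
      have step : checkGo ft (fuel + 1) (b : Int)
          = checkGo ft fuel (if (b : Int) + 1 = (ft.length : Int) then 0 else (b : Int) + 1) := by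
        simp [checkGo, hpg, hz]
      -- the next scan position, as a Nat
      set b' : Nat := if b + 1 = ft.length then 0 else b + 1 with hb'def
      have hb'lt : b' < ft.length := by
        by_cases hw : b + 1 = ft.length <;> simp [hb'def, hw] <;> omega
      have hwrapI : (if (b : Int) + 1 = (ft.length : Int) then 0 else (b : Int) + 1) = (b' : Int) := by
        by_cases hw : b + 1 = ft.length
        · rw [if_pos (by exact_mod_cast congrArg (Nat.cast : Nat → Int) hw)]
          simp [hb'def, hw]
        · rw [if_neg (by intro hc; apply hw; exact_mod_cast hc)]
          simp [hb'def, hw]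
      -- the termination measure moves to the next position and decreases
      have hQb : Qe ft b' = Qe ft b := by
        by_cases hw : b + 1 = ft.length
        · have hlen2 : b + 1 = (PySem.List.enumerate ft 0).length := by
            rw [PySem.List.length_enumerate]; omega
          rw [cyc_of_eq_length (PySem.List.enumerate ft 0) (b + 1) hlen2] at hrot
          rw [hb'def, if_pos hw, Qe, cyc_zero, hrot, List.filter_append, hQ]
          simp [hz]
        · rw [hb'def, if_neg hw, Qe, hrot, List.filter_append, hQ]
          simp [hz]
      have hZsucc : Zc ft b = ((PySem.List.enumerate ft 0).drop (b + 1) ++ (PySem.List.enumerate ft 0).take b).findIdx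
          (fun p => decide (p.2 ≠ 0)) + 1 := by
        rw [Zc, hhd]; simp [List.findIdx_cons, hz]
      have hZb : Zc ft b' < fuel := by
        by_cases hw : b + 1 = ft.length
        · have hlen2 : b + 1 = (PySem.List.enumerate ft 0).length := by
            rw [PySem.List.length_enumerate]; omega
          rw [cyc_of_eq_length (PySem.List.enumerate ft 0) (b + 1) hlen2] at hrot
          rw [hb'def, if_pos hw, Zc, cyc_zero, hrot, List.findIdx_append]
          simp only [hltl, if_pos]
          omega
        · rw [hb'def, if_neg hw, Zc, hrot, List.findIdx_append]
          simp only [hltl, if_pos]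
          omega
      -- B's queue: the zero front dish either was discarded long ago or is
      -- discarded now; either way cleaning continues from the next position
      by_cases hbZ : (b : Int) ∈ Z
      · have hQz : Qz ft b' Z = Qz ft b Z := Qz_rot ft b hb Z hbZ b' hb'def
        obtain ⟨c, W, h1, h2, h3, h4, h5, h6⟩ := ih b' Z hb'lt hZok (hQb ▸ hne) hZb
        refine ⟨c, W, h1, ?_, h3, h4, h5, by rw [← hQz]; exact h6⟩
        rw [step, hwrapI]; exact h2
      · have hZok' : ZOK ft ((b : Int) :: Z) := by
          intro p hp hpm
          rcases List.mem_cons.mp hpm with hpb | hpZ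
          · rcases (PySem.List.mem_enumerate_iff ft 0 p).mp hp with ⟨j, hj, hpj⟩
            have : j = b := by
              have := hpb
              rw [hpj] at this
              simp at this
              exact_mod_cast this
            subst this
            rw [hpj]; simpa using hz
          · exact hZok p hp hpZ
        have hfrontdrop : clean (Qz ft b Z) = clean (Qz ft b' ((b : Int) :: Z)) := by
          have hQzb : Qz ft b Z = ((b : Int), ft[b]) ::
              ((PySem.List.enumerate ft 0).drop (b + 1) ++ (PySem.List.enumerate ft 0).take b).filter
                (fun p => decide (¬ p.1 ∈ Z)) := by
            rw [Qz, hhd]; simp [hbZ]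
          have hrestZ : ((PySem.List.enumerate ft 0).drop (b + 1) ++ (PySem.List.enumerate ft 0).take b).filter
                (fun p => decide (¬ p.1 ∈ ((b : Int) :: Z)))
              = ((PySem.List.enumerate ft 0).drop (b + 1) ++ (PySem.List.enumerate ft 0).take b).filter
                (fun p => decide (¬ p.1 ∈ Z)) := by
            apply List.filter_congr
            intro p hp
            have := fst_ne_of_mem_rest ft b p hp
            simp [this]
          have hQzb' : Qz ft b' ((b : Int) :: Z) = ((PySem.List.enumerate ft 0).drop (b + 1) ++ (PySem.List.enumerate ft 0).take b).filter
                (fun p => decide (¬ p.1 ∈ Z)) := by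
            rw [Qz_rot ft b hb ((b : Int) :: Z) (List.mem_cons_self) b' hb'def, Qz, hhd,
              List.filter_cons_of_neg (by simp)]
            exact hrestZ
          rw [hQzb, hQzb']
          simp [clean, hz]
        obtain ⟨c, W, h1, h2, h3, h4, h5, h6⟩ := ih b' ((b : Int) :: Z) hb'lt hZok' (hQb ▸ hne) hZb
        refine ⟨c, W, h1, ?_, h3, h4, h5, by rw [hfrontdrop]; exact h6⟩
        rw [step, hwrapI]; exact h2
    · -- the front dish is nonzero: check stops here, cleaning stops here
      have hbZ : ¬((b : Int) ∈ Z) := fun hm => hz (ZOK_get ft Z hZok b hb hm)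
      refine ⟨b, Z, hb, ?_, ?_, hZok, hbZ, ?_⟩
      · simp [checkGo, hpg, hz]
      · rw [List.getD_eq_getElem ft 0 hb]; exact hz
      · rw [Qz, enum_head ft b hb]
        simp only [List.filter_cons]
        simp [hbZ, clean, hz]

theorem sum_set_lt (l : List Int) (a : Nat) (v : Int) (h : a < l.length) :
    (l.set a v).sum = l.sum - l.getD a 0 + v := by
  rw [List.sum_set, List.getD_eq_getElem l 0 h]
  have h2 := List.sum_take_add_sum_drop l a
  have h3 : l.drop a = l[a] :: l.drop (a + 1) := (List.getElem_cons_drop h).symm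
  rw [h3, List.sum_cons] at h2
  simp only [h, if_pos]
  omega

theorem SP_set (ft : List Int) (a : Nat) (v : Int) (h : a < ft.length) :
    SP (ft.set a v) = SP ft - max ft[a] 0 + max v 0 := by
  unfold SP
  rw [List.map_set, sum_set_lt _ a _ (by simp [h]),
    List.getD_eq_getElem _ 0 (by simp [h]), List.getElem_map]

theorem enum_set (ft : List Int) (a : Nat) (v : Int) :
    PySem.List.enumerate (ft.set a v) 0 = (PySem.List.enumerate ft 0).set a ((a : Int), v) := by
  apply List.ext_getElem?
  intro i
  rw [PySem.List.getElem?_enumerate, List.getElem?_set, List.getElem?_set,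
    PySem.List.getElem?_enumerate, PySem.List.length_enumerate]
  by_cases hia : a = i
  · subst hia
    by_cases hlt : a < ft.length <;> simp [hlt]
  · simp [hia]

theorem Qe_ne_nil (ft : List Int) (a : Nat) (hex : ∃ x ∈ ft, x ≠ 0) : Qe ft a ≠ [] := by
  intro hnil
  rcases hex with ⟨x, hx, hxne⟩
  rcases List.mem_iff_getElem.mp hx with ⟨j, hj, hjx⟩
  have hmem : ((j : Int), x) ∈ PySem.List.enumerate ft 0 := by
    rw [PySem.List.mem_enumerate_iff]
    exact ⟨j, hj, by simp [hjx]⟩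
  have hmemc : ((j : Int), x) ∈ cyc (PySem.List.enumerate ft 0) a := by
    unfold cyc
    rw [← List.take_append_drop a (PySem.List.enumerate ft 0)] at hmem
    rcases List.mem_append.mp hmem with h | h
    · exact List.mem_append.mpr (Or.inr h)
    · exact List.mem_append.mpr (Or.inl h)
  have := List.filter_eq_nil_iff.mp hnil _ hmemc
  simp at this
  exact hxne this

theorem Qe_exists (ft : List Int) (a : Nat) (h : Qe ft a ≠ []) :
    ∃ p ∈ cyc (PySem.List.enumerate ft 0) a, (fun p : Int × Int => decide (p.2 ≠ 0)) p = true := by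
  rcases List.exists_mem_of_ne_nil _ h with ⟨p, hp⟩
  exact ⟨p, (List.mem_filter.mp hp).1, (List.mem_filter.mp hp).2⟩

theorem Zc_lt (ft : List Int) (a : Nat) (h : Qe ft a ≠ []) : Zc ft a < ft.length + 1 := by
  have := List.findIdx_lt_length_of_exists (Qe_exists ft a h)
  unfold Zc
  unfold cyc at this ⊢
  simp [PySem.List.length_enumerate] at this ⊢
  omega

theorem hinv_ex (ft : List Int) (n : Nat)
    (h : (∃ x ∈ ft, x < 0) ∨ (n : Int) < SP ft) : ∃ x ∈ ft, x ≠ 0 := by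
  rcases h with ⟨x, hx, hlt⟩ | hlt
  · exact ⟨x, hx, by omega⟩
  · by_contra hc
    push_neg at hc
    have hz : ∀ y ∈ ft.map (fun x => max x 0), y = 0 := by
      intro y hy
      rcases List.mem_map.mp hy with ⟨x, hx, hxy⟩
      have := hc x hx
      omega
    have : SP ft = 0 := List.sum_eq_zero hz
    have hn : (0 : Int) ≤ (n : Int) := Int.natCast_nonneg n
    omega

-- one decrement at position a turns the queue seen from the successor position into
-- exactly the queue B produces by popping and (conditionally) re-appending the front
theorem Qz_step (ft : List Int) (a : Nat) (ha : a < ft.length) (Z : List Int)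
    (haZ : ¬((a : Int) ∈ Z)) (b : Nat) (hb : b = if a + 1 = ft.length then 0 else a + 1) :
    Qz (ft.set a (ft[a] - 1)) b (if ft[a] - 1 ≠ 0 then Z else ((a : Int) :: Z)) =
      (if ft[a] - 1 ≠ 0
        then (((PySem.List.enumerate ft 0).drop (a + 1) ++ (PySem.List.enumerate ft 0).take a).filter
          (fun p => decide (¬ p.1 ∈ Z))) ++ [((a : Int), ft[a] - 1)]
        else ((PySem.List.enumerate ft 0).drop (a + 1) ++ (PySem.List.enumerate ft 0).take a).filter
          (fun p => decide (¬ p.1 ∈ Z))) := by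
  set ft' := ft.set a (ft[a] - 1) with hft'def
  have ha' : a < ft'.length := by simp [hft'def, List.length_set]; omega
  have hgetA : ft'[a]'ha' = ft[a] - 1 := by simp [hft'def]
  have hdrop : (PySem.List.enumerate ft' 0).drop (a + 1) = (PySem.List.enumerate ft 0).drop (a + 1) := by
    rw [hft'def, enum_set, List.drop_set]
    simp
  have htake : (PySem.List.enumerate ft' 0).take a = (PySem.List.enumerate ft 0).take a := by
    rw [hft'def, enum_set, List.take_set,
      List.set_eq_of_length_le (by simp [PySem.List.length_enumerate])]
  have hcyc : cyc (PySem.List.enumerate ft' 0) b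
      = ((PySem.List.enumerate ft 0).drop (a + 1) ++ (PySem.List.enumerate ft 0).take a) ++ [((a : Int), ft[a] - 1)] := by
    by_cases hw : a + 1 = ft.length
    · have hlen2 : a + 1 = (PySem.List.enumerate ft' 0).length := by
        rw [PySem.List.length_enumerate, hft'def, List.length_set]; omega
      have hrot := enum_rot ft' a ha'
      rw [cyc_of_eq_length (PySem.List.enumerate ft' 0) (a + 1) hlen2] at hrot
      rw [hb, if_pos hw, cyc_zero, hrot, hdrop, htake, hgetA]
    · rw [hb, if_neg hw, enum_rot ft' a ha', hdrop, htake, hgetA]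
  by_cases h1 : ft[a] - 1 ≠ 0
  · rw [if_pos h1, if_pos h1, Qz, hcyc, List.filter_append]
    simp [haZ]
  · rw [if_neg h1, if_neg h1, Qz, hcyc, List.filter_append]
    have hrestZ : ((PySem.List.enumerate ft 0).drop (a + 1) ++ (PySem.List.enumerate ft 0).take a).filter
          (fun p => decide (¬ p.1 ∈ ((a : Int) :: Z)))
        = ((PySem.List.enumerate ft 0).drop (a + 1) ++ (PySem.List.enumerate ft 0).take a).filter
          (fun p => decide (¬ p.1 ∈ Z)) := by
      apply List.filter_congr
      intro p hp
      have := fst_ne_of_mem_rest ft a p hp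
      simp [this]
    rw [hrestZ]
    simp

-- the main loop invariant: A's (array, position) state against B's queue
theorem main_lemma (n : Nat) : ∀ (ft : List Int) (a : Nat) (Z : List Int),
    a < ft.length → ZOK ft Z → ¬((a : Int) ∈ Z) →
    ((∃ x ∈ ft, x < 0) ∨ (n : Int) < SP ft ∨ ft.getD a 0 = 0) →
    solGo n ft (a : Int) = ((bGo n (Qz ft a Z)).headD (0, 0)).1 := by
  induction n with
  | zero =>
    intro ft a Z ha _ haZ _
    have : Qz ft a Z = ((a : Int), ft[a]) ::
        ((PySem.List.enumerate ft 0).drop (a + 1) ++ (PySem.List.enumerate ft 0).take a).filter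
          (fun p => decide (¬ p.1 ∈ Z)) := by
      rw [Qz, enum_head ft a ha]; simp [haZ]
    rw [this]
    simp [solGo, bGo]
  | succ n ih =>
    intro ft a Z ha hZok haZ hInv
    have hpg : PySem.List.pyGetD ft (a : Int) 0 = ft[a] := by
      rw [PySem.List.pyGetD_natCast]; exact List.getD_eq_getElem ft 0 ha
    have hft' : PySem.List.pySetD ft (a : Int) (PySem.List.pyGetD ft (a : Int) 0 - 1)
        = ft.set a (ft[a] - 1) := by
      rw [hpg, PySem.List.pySetD_natCast]
    set ft' := ft.set a (ft[a] - 1) with hft'def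
    have hlen' : ft'.length = ft.length := by rw [hft'def, List.length_set]
    have ha' : a < ft'.length := by omega
    have hgetA : ft'[a]'(by omega) = ft[a] - 1 := by
      simp [hft'def]
    -- the loop invariant is preserved, in the strong (first two disjuncts) form
    have hInv' : (∃ x ∈ ft', x < 0) ∨ (n : Int) < SP ft' := by
      rcases hInv with ⟨x, hx, hxlt⟩ | hlt | hz0
      · rcases List.mem_iff_getElem.mp hx with ⟨j, hj, hjx⟩
        by_cases hja : j = a
        · subst hja
          left
          exact ⟨ft[j] - 1, by rw [← hgetA]; exact List.getElem_mem _, by omega⟩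
        · left
          refine ⟨x, ?_, hxlt⟩
          rw [← hjx]
          have : ft'[j]'(by omega) = ft[j] :=
            List.getElem_set_ne (by omega) (by simp only [List.length_set]; omega)
          rw [← this]
          exact List.getElem_mem _
      · by_cases hpos : 0 < ft[a]
        · right
          have := SP_set ft a (ft[a] - 1) ha
          rw [← hft'def] at this
          push_cast at hlt ⊢
          have hmax1 : max ft[a] 0 = ft[a] := by omega
          have hmax2 : max (ft[a] - 1) 0 = ft[a] - 1 := by omega
          rw [hmax1, hmax2] at this
          omega
        · left
          exact ⟨ft[a] - 1, by rw [← hgetA]; exact List.getElem_mem _, by omega⟩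
      · left
        rw [List.getD_eq_getElem ft 0 ha] at hz0
        exact ⟨ft[a] - 1, by rw [← hgetA]; exact List.getElem_mem _, by omega⟩
    -- the queue after B pops, decrements and maybe re-appends the front pair
    set rest := ((PySem.List.enumerate ft 0).drop (a + 1) ++ (PySem.List.enumerate ft 0).take a).filter
        (fun p : Int × Int => decide (¬ p.1 ∈ Z)) with hrest
    set b : Nat := if a + 1 = ft.length then 0 else a + 1 with hbdef
    have hble : b < ft.length := by
      by_cases hw : a + 1 = ft.length <;> simp [hbdef, hw] <;> omega
    set Zb : List Int := if ft[a] - 1 ≠ 0 then Z else ((a : Int) :: Z) with hZbdef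
    have hQbq : Qz ft' b Zb = (if ft[a] - 1 ≠ 0 then rest ++ [((a : Int), ft[a] - 1)] else rest) := by
      have := Qz_step ft a ha Z haZ b hbdef
      rw [← hft'def, ← hrest, ← hZbdef] at this
      exact this
    have hZokb : ZOK ft' Zb := by
      intro p hp hpm
      rcases (PySem.List.mem_enumerate_iff ft' 0 p).mp hp with ⟨j, hj, hpj⟩
      have hpj1 : p.1 = (j : Int) := by rw [hpj]; simp
      have hpj2 : p.2 = ft'.getD j 0 := by
        rw [List.getD_eq_getElem ft' 0 hj, hpj]
      rw [hpj1] at hpm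
      rw [hpj2]
      have hjlen : j < ft.length := by omega
      by_cases hja : j = a
      · by_cases h1 : ft[a] - 1 ≠ 0
        · exfalso
          apply haZ
          rw [hZbdef, if_pos h1] at hpm
          rwa [hja] at hpm
        · rw [hja, hft'def, List.getD_eq_getElem _ 0 (by simp only [List.length_set]; omega),
            List.getElem_set]
          simp
          omega
      · have hjz : (j : Int) ∈ Z := by
          rw [hZbdef] at hpm
          by_cases h1 : ft[a] - 1 ≠ 0
          · rwa [if_pos h1] at hpm
          · rw [if_neg h1] at hpm
            rcases List.mem_cons.mp hpm with hc | hc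
            · exact absurd (by exact_mod_cast hc) hja
            · exact hc
        have : ft'.getD j 0 = ft.getD j 0 := by
          rw [hft'def, List.getD_eq_getElem _ 0 (by simp only [List.length_set]; omega),
            List.getD_eq_getElem _ 0 hjlen, List.getElem_set]
          rw [if_neg (fun h => hja h.symm)]
        rw [this, List.getD_eq_getElem _ 0 hjlen]
        exact ZOK_get ft Z hZok j hjlen hjz
    have hQne : Qe ft' b ≠ [] := Qe_ne_nil ft' b (hinv_ex ft' n hInv')
    have hZlt : Zc ft' b < ft'.length + 1 := Zc_lt ft' b hQne
    obtain ⟨c, W, hc1, hc2, hc3, hc4, hc5, hc6⟩ :=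
      check_clean (ft'.length + 1) ft' b Zb (by omega) hZokb hQne hZlt
    -- the Int-level wrap equals the Nat-level wrap
    have hwrap : (if (a : Int) + 1 = (ft'.length : Int) then 0 else (a : Int) + 1) = (b : Int) := by
      by_cases hw : a + 1 = ft.length
      · rw [if_pos (by rw [hlen']; exact_mod_cast congrArg (Nat.cast : Nat → Int) hw)]
        simp [hbdef, hw]
      · rw [if_neg (by rw [hlen']; intro hc; apply hw; exact_mod_cast hc)]
        simp [hbdef, hw]
    -- left side: one step of A
    have hL : solGo (n + 1) ft (a : Int) = solGo n ft' (c : Int) := by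
      show (let ftx := PySem.List.pySetD ft (a : Int) (PySem.List.pyGetD ft (a : Int) 0 - 1);
        solGo n ftx (checkA ftx (if (a : Int) + 1 = (ftx.length : Int) then 0 else (a : Int) + 1))) = _
      simp only [hft']
      rw [checkA, hwrap, hc2]
    -- right side: one step of B
    have hhd : Qz ft a Z = ((a : Int), ft[a]) :: rest := by
      rw [Qz, enum_head ft a ha, hrest]; simp [haZ]
    have hR : bGo (n + 1) (Qz ft a Z)
        = bGo n (clean (if ft[a] - 1 ≠ 0 then rest ++ [((a : Int), ft[a] - 1)] else rest)) := by
      rw [hhd]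
      simp only [bGo]
    rw [hL, hR, ← hQbq, hc6]
    have hInv3 : (∃ x ∈ ft', x < 0) ∨ (n : Int) < SP ft' ∨ ft'.getD c 0 = 0 := by
      rcases hInv' with h | h
      · exact Or.inl h
      · exact Or.inr (Or.inl h)
    exact ih ft' c W hc1 hc4 hc5 hInv3

-- a member's positive part is at most the sum of positive parts
theorem SP_pos_of_head (ft : List Int) (h0 : 0 < ft.length) (hz : ft[0] ≠ 0)
    (hall : ∀ x ∈ ft, 0 ≤ x) : 0 < SP ft := by
  have hmem : max ft[0] 0 ∈ ft.map (fun x => max x 0) :=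
    List.mem_map.mpr ⟨ft[0], List.getElem_mem _, rfl⟩
  have hle : max ft[0] 0 ≤ SP ft := by
    apply List.single_le_sum _ _ hmem
    intro y hy
    rcases List.mem_map.mp hy with ⟨x, _, hxy⟩
    omega
  have h0le : 0 ≤ ft[0] := hall _ (List.getElem_mem _)
  have : 0 < ft[0] := by omega
  omega

-- ===== VERDICT (by name: the statement is the Claim_ definition above) =====
theorem solution_spec : Claim_equal_solution := by
  intro ft k _ hpre
  unfold Spec_solution solution solution_alt
  rcases hpre with ⟨hne, hbad⟩
  have h0 : 0 < ft.length := List.length_pos_of_ne_nil hne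
  have hq0 : Qz ft 0 [] = PySem.List.enumerate ft 0 := by
    rw [Qz, cyc_zero]
    simp
  have hZok0 : ZOK ft [] := by
    intro p _ hm
    simp at hm
  have hInv : (∃ x ∈ ft, x < 0) ∨ ((k.toNat : Nat) : Int) < SP ft ∨ ft.getD 0 0 = 0 := by
    by_cases hneg : ∃ x ∈ ft, x < 0
    · exact Or.inl hneg
    · push_neg at hneg
      have hall : ∀ x ∈ ft, 0 ≤ x := fun x hx => hneg x hx
      by_cases hz0 : ft.getD 0 0 = 0
      · exact Or.inr (Or.inr hz0)
      · right; left
        have hz : ft[0] ≠ 0 := by rwa [List.getD_eq_getElem ft 0 h0] at hz0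
        by_cases hk0 : k ≤ 0
        · rw [Int.toNat_of_nonpos hk0]
          exact_mod_cast SP_pos_of_head ft h0 hz hall
        · have hk1 : 1 ≤ k := by omega
          have : ¬(ft.getD 0 0 ≠ 0 ∧ SP ft ≤ k) := fun h => hbad ⟨hk1, hall, h.1, h.2⟩
          have hklt : k < SP ft := by
            by_contra hc
            exact this ⟨hz0, by omega⟩
          rw [Int.toNat_of_nonneg (by omega)]
          exact hklt
  have hmain := main_lemma k.toNat ft 0 [] h0 hZok0 (by simp) hInv
  rw [hq0] at hmain
  exact_mod_cast hmain
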